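-- pv_equiv track=rewrite | github.com/mfelleisen/Transformations | llms/generate_highs.py | get_racket_docstring
-- ===== SOURCE A (Python) =====
-- def get_racket_docstring(code: str) -> str:
--     docstring = ""
--     for line in code.split("\n"):
--         if line.startswith(";;"):
--             docstring += line + "\n"
--         elif "#lang" in line or line.strip() == "":
--             continue
--         else:
--             break
--     return docstring
-- ===== SOURCE B (Python) =====
-- def get_racket_docstring(code: str) -> str:
--     # character-level scan: never splits the code into a line list; streams the
--     # characters of code plus one sentinel newline, buffering the current line
--     # and classifying/flushing it each time a newline is reached
--     out = []
--     cur = []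
--     for ch in code + "\n":
--         if ch != "\n":
--             cur.append(ch)
--             continue
--         line = "".join(cur)
--         cur = []
--         if line.startswith(";;"):
--             out.append(line + "\n")
--         elif "#lang" not in line and line.strip() != "":
--             break
--     return "".join(out)
-- ===== Notes on version B (the rewrite author's own statement) =====
-- stated objective: alternative
-- what changed: A splits the code into a list of lines and accumulates the docstring string in one loop over that list; B never splits: it streams character by character over code plus a sentinel newline, buffering the current line and classifying/flushing it at each newline.
import Mathlib
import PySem

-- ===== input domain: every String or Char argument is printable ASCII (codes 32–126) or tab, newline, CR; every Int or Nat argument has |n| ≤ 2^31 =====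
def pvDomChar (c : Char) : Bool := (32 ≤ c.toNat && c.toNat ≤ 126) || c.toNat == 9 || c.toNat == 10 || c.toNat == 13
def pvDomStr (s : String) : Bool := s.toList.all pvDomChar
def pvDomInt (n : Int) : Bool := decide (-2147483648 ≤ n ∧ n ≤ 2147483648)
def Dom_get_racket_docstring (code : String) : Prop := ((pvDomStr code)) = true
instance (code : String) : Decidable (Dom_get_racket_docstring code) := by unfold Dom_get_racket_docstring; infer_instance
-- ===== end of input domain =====

-- B replaces A's split-into-lines loop by a character-level streaming scanner over
-- code plus a sentinel newline; objective: alternative (same asymptotic cost).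


-- ===== PORT A =====
-- A's loop: accumulate ';;' lines into the docstring, skip '#lang'/blank lines, break otherwise
def pvGoA : List String → String → String
  | [], acc => acc
  | l :: ls, acc =>
    if PySem.Str.startswith l ";;" then pvGoA ls (acc ++ (l ++ "\n"))
    else if PySem.Str.isIn "#lang" l || (PySem.Str.strip l == "") then pvGoA ls acc
    else acc

def get_racket_docstring (code : String) : String :=
  pvGoA ((PySem.Chars.splitOn code.toList "\n".toList).map String.ofList) ""

-- ===== PORT B =====
-- B's character-level scanner: cur buffers the current line's characters; at each
-- newline the buffered line is classified (collect / stop / skip) and flushed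
def pvGoB : List Char → List Char → List String → List String
  | [], _, out => out
  | c :: cs, cur, out =>
    if c ≠ '\n' then pvGoB cs (cur ++ [c]) out
    else
      let line := String.ofList cur
      if PySem.Str.startswith line ";;" then pvGoB cs [] (out ++ [line ++ "\n"])
      else if !(PySem.Str.isIn "#lang" line) && !(PySem.Str.strip line == "") then out
      else pvGoB cs [] out

def get_racket_docstring_alt (code : String) : String :=
  PySem.Str.join "" (pvGoB (code.toList ++ ['\n']) [] [])

-- ===== PRECONDITION & SPEC =====
def Spec_get_racket_docstring (code : String) (out : String) : Prop := out = get_racket_docstring_alt code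
instance (code : String) (out : String) : Decidable (Spec_get_racket_docstring code out) := by unfold Spec_get_racket_docstring; infer_instance

-- ===== CLAIM (what is proved, stated in full; the proofs are below) =====
def Claim_equal_get_racket_docstring : Prop := ∀ (code : String), Dom_get_racket_docstring code → Spec_get_racket_docstring code (get_racket_docstring code)

-- ===== LEMMAS AND PROOFS =====

-- two Boolean de-Morgan facts used to flip A's or-condition into B's and-condition
theorem pv_bool_or_not_and (x y : Bool) (h : (x || y) = true) : ¬ ((!x && !y) = true) := by
  rcases x <;> rcases y <;> simp_all

theorem pv_bool_not_or_and (x y : Bool) (h : ¬ (x || y) = true) : (!x && !y) = true := by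
  rcases x <;> rcases y <;> simp_all

-- "".join over a cons, at the String level
theorem pv_join_empty_cons (x : String) (xs : List String) :
    PySem.Str.join "" (x :: xs) = x ++ PySem.Str.join "" xs := by
  cases xs with
  | nil => simp [PySem.Str.join, PySem.Chars.join_singleton, PySem.Chars.join_nil,
      String.ofList_toList]
  | cons y ys =>
    simp only [PySem.Str.join, List.map_cons]
    rw [PySem.Chars.join_cons_cons]
    simp [String.ofList_append, String.ofList_toList]

theorem pv_join_empty_nil : PySem.Str.join "" ([] : List String) = "" := by
  simp [PySem.Str.join, PySem.Chars.join_nil]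

-- splitOn.go with enough fuel on a newline-free list yields one segment
theorem pv_go_no_nl (l : List Char) : ∀ (fuel : Nat) (cur : List Char) (acc : List (List Char)),
    l.length < fuel → '\n' ∉ l →
    PySem.Chars.splitOn.go ['\n'] fuel l cur acc = ((cur.reverse ++ l) :: acc).reverse := by
  induction l with
  | nil =>
    intro fuel cur acc hf _
    cases fuel with
    | zero => omega
    | succ f => simp [PySem.Chars.splitOn.go]
  | cons c rest ih =>
    intro fuel cur acc hf hm
    cases fuel with
    | zero => omega
    | succ f =>
      have hc : c ≠ '\n' := fun h => hm (h ▸ List.mem_cons_self)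
      have hpre : (['\n'].isPrefixOf (c :: rest)) = false := by
        simp [List.isPrefixOf]; exact fun h => hc h.symm
      rw [PySem.Chars.splitOn.go]
      simp only [hpre, Bool.false_eq_true, if_false]
      rw [ih f (c :: cur) acc (by simpa using Nat.lt_of_succ_lt_succ hf)
        (fun h => hm (List.mem_cons_of_mem _ h))]
      simp

-- splitOn.go consumes a newline-free prefix plus its terminating newline
theorem pv_go_step (a : List Char) : ∀ (fuel : Nat) (b cur : List Char) (acc : List (List Char)),
    '\n' ∉ a → a.length < fuel →
    PySem.Chars.splitOn.go ['\n'] fuel (a ++ '\n' :: b) cur acc =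
      PySem.Chars.splitOn.go ['\n'] (fuel - (a.length + 1)) b [] ((cur.reverse ++ a) :: acc) := by
  induction a with
  | nil =>
    intro fuel b cur acc _ hf
    cases fuel with
    | zero => omega
    | succ f =>
      have hpre : (['\n'].isPrefixOf ('\n' :: b)) = true := by simp [List.isPrefixOf]
      rw [List.nil_append, PySem.Chars.splitOn.go]
      simp [hpre]
  | cons c a' ih =>
    intro fuel b cur acc hm hf
    cases fuel with
    | zero => omega
    | succ f =>
      have hc : c ≠ '\n' := fun h => hm (h ▸ List.mem_cons_self)
      have hpre : (['\n'].isPrefixOf (c :: (a' ++ '\n' :: b))) = false := by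
        simp [List.isPrefixOf]; exact fun h => hc h.symm
      rw [List.cons_append, PySem.Chars.splitOn.go]
      simp only [hpre, Bool.false_eq_true, if_false]
      rw [ih f b (c :: cur) acc (fun h => hm (List.mem_cons_of_mem _ h))
        (by simpa using Nat.lt_of_succ_lt_succ hf)]
      have hfuel : f - (a'.length + 1) = f + 1 - ((c :: a').length + 1) := by
        simp only [List.length_cons]; omega
      rw [hfuel]
      simp

-- splitOn.go ignores its accumulator up to reversal
theorem pv_go_acc (fuel : Nat) : ∀ (l cur : List Char) (acc : List (List Char)),
    PySem.Chars.splitOn.go ['\n'] fuel l cur acc =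
      acc.reverse ++ PySem.Chars.splitOn.go ['\n'] fuel l cur [] := by
  induction fuel with
  | zero => intro l cur acc; simp [PySem.Chars.splitOn.go]
  | succ f ih =>
    intro l cur acc
    cases l with
    | nil => simp [PySem.Chars.splitOn.go]
    | cons c rest =>
      rw [PySem.Chars.splitOn.go]
      conv_rhs => rw [PySem.Chars.splitOn.go]
      by_cases hp : (['\n'].isPrefixOf (c :: rest)) = true
      · rw [if_pos hp]
        rw [if_pos hp]
        rw [ih _ _ (cur.reverse :: acc), ih _ _ ([cur.reverse])]
        simp
      · rw [if_neg hp]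
        rw [if_neg hp]
        rw [ih _ _ acc]

-- splitOn of a newline-free list is that single segment
theorem pv_splitOn_no_nl (s : List Char) (h : '\n' ∉ s) :
    PySem.Chars.splitOn s ['\n'] = [s] := by
  unfold PySem.Chars.splitOn
  rw [pv_go_no_nl s (s.length + 1) [] [] (Nat.lt_succ_self _) h]
  simp

-- splitOn peels the first line off a newline-containing list
theorem pv_splitOn_cons (a b : List Char) (h : '\n' ∉ a) :
    PySem.Chars.splitOn (a ++ '\n' :: b) ['\n'] = a :: PySem.Chars.splitOn b ['\n'] := by
  unfold PySem.Chars.splitOn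
  rw [pv_go_step a ((a ++ '\n' :: b).length + 1) b [] [] h (by simp)]
  have : (a ++ '\n' :: b).length + 1 - (a.length + 1) = b.length + 1 := by simp
  rw [this, pv_go_acc]
  simp

-- B's scanner flushing a line at a newline, written without the let-binding
theorem pvGoB_newline (cs cur : List Char) (out : List String) :
    pvGoB ('\n' :: cs) cur out =
      (if PySem.Str.startswith (String.ofList cur) ";;" then
        pvGoB cs [] (out ++ [String.ofList cur ++ "\n"])
      else if !(PySem.Str.isIn "#lang" (String.ofList cur)) &&
          !(PySem.Str.strip (String.ofList cur) == "") then out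
      else pvGoB cs [] out) := by
  rw [pvGoB]
  simp only [ne_eq, not_true_eq_false, if_false]

-- B's scanner ignores already-flushed output up to list append
theorem pv_goB_out (cs : List Char) : ∀ (cur : List Char) (out : List String),
    pvGoB cs cur out = out ++ pvGoB cs cur [] := by
  induction cs with
  | nil => intro cur out; simp [pvGoB]
  | cons c cs ih =>
    intro cur out
    by_cases h1 : c ≠ '\n'
    · rw [pvGoB]
      conv_rhs => rw [pvGoB]
      rw [if_pos h1, if_pos h1]
      exact ih _ _
    · push Not at h1
      subst h1
      rw [pvGoB_newline, pvGoB_newline]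
      split_ifs with h2 h3
      · rw [ih _ (out ++ _), ih _ ([] ++ _)]
        simp
      · simp
      · exact ih _ _

-- B's scanner over a newline-free prefix buffers it, then classifies/flushes at the newline
theorem pv_goB_line (a : List Char) : ∀ (cs cur : List Char) (out : List String),
    '\n' ∉ a →
    pvGoB (a ++ '\n' :: cs) cur out =
      (if PySem.Str.startswith (String.ofList (cur ++ a)) ";;" then
        pvGoB cs [] (out ++ [String.ofList (cur ++ a) ++ "\n"])
      else if !(PySem.Str.isIn "#lang" (String.ofList (cur ++ a))) &&
          !(PySem.Str.strip (String.ofList (cur ++ a)) == "") then out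
      else pvGoB cs [] out) := by
  induction a with
  | nil =>
    intro cs cur out _
    rw [List.nil_append, pvGoB_newline]
    simp
  | cons c a' ih =>
    intro cs cur out hm
    have hc : c ≠ '\n' := fun h => hm (h ▸ List.mem_cons_self)
    rw [List.cons_append, pvGoB, if_pos hc,
      ih cs (cur ++ [c]) out (fun h => hm (List.mem_cons_of_mem _ h))]
    simp

-- main correspondence: A's line loop = B's character scanner (with sentinel newline)
theorem pv_main (n : Nat) : ∀ (s : List Char), s.length ≤ n → ∀ (acc : String),
    pvGoA ((PySem.Chars.splitOn s ['\n']).map String.ofList) acc =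
      acc ++ PySem.Str.join "" (pvGoB (s ++ ['\n']) [] []) := by
  induction n with
  | zero =>
    intro s hs acc
    have hnil : s = [] := List.eq_nil_of_length_eq_zero (Nat.le_zero.mp hs)
    subst hnil
    rw [pv_splitOn_no_nl [] (by simp), List.nil_append, List.map_cons, List.map_nil, pvGoA,
      if_neg (by decide), if_pos (by decide), pvGoA,
      show pvGoB ['\n'] [] [] = [] from rfl, pv_join_empty_nil]
    simp
  | succ n ih =>
    intro s hs acc
    by_cases hnl : '\n' ∈ s
    · -- s = a ++ '\n' :: b with '\n' ∉ a: peel the first line on both sides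
      obtain ⟨a, b, hna, hdecomp⟩ : ∃ a b, '\n' ∉ a ∧ s = a ++ '\n' :: b := by
        have hrne : s.dropWhile (fun c => c ≠ '\n') ≠ [] := by
          intro h
          have := (List.dropWhile_eq_nil_iff).mp h _ hnl
          simp at this
        have hhead : (s.dropWhile (fun c => c ≠ '\n')).head hrne = '\n' := by
          have := List.head_dropWhile_not (fun c => decide (c ≠ '\n')) hrne
          simpa using this
        refine ⟨s.takeWhile (fun c => c ≠ '\n'), (s.dropWhile (fun c => c ≠ '\n')).tail,
          ?_, ?_⟩
        · intro h
          have := List.mem_takeWhile_imp h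
          simp at this
        · have h5 : s.dropWhile (fun c => c ≠ '\n') =
              '\n' :: (s.dropWhile (fun c => c ≠ '\n')).tail := by
            have h6 := List.cons_head_tail hrne
            rw [hhead] at h6
            exact h6.symm
          have h7 := congrArg
            (fun t => List.takeWhile (fun c => decide (c ≠ '\n')) s ++ t) h5
          simpa [List.takeWhile_append_dropWhile] using h7
      have hlb : b.length ≤ n := by
        have : s.length = a.length + b.length + 1 := by rw [hdecomp]; simp; omega
        omega
      subst hdecomp
      rw [pv_splitOn_cons a b hna, List.map_cons, pvGoA, List.append_assoc, List.cons_append,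
        pv_goB_line a (b ++ ['\n']) [] [] hna]
      simp only [List.nil_append]
      by_cases h1 : PySem.Str.startswith (String.ofList a) ";;" = true
      · rw [if_pos h1, if_pos h1, ih b hlb]
        conv_rhs => rw [pv_goB_out]
        rw [List.singleton_append, pv_join_empty_cons]
        simp [String.append_assoc]
      · rw [if_neg h1, if_neg h1]
        by_cases h2 : (PySem.Str.isIn "#lang" (String.ofList a) ||
            (PySem.Str.strip (String.ofList a) == "")) = true
        · have h2f := pv_bool_or_not_and _ _ h2
          rw [if_pos h2, if_neg h2f]
          exact ih b hlb acc
        · have h2t := pv_bool_not_or_and _ _ h2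
          rw [if_neg h2, if_pos h2t, pv_join_empty_nil]
          simp
    · -- newline-free s: one line, flushed by the sentinel
      rw [pv_splitOn_no_nl s hnl, List.map_cons, List.map_nil, pvGoA,
        pv_goB_line s [] [] [] hnl]
      simp only [List.nil_append]
      by_cases h1 : PySem.Str.startswith (String.ofList s) ";;" = true
      · rw [if_pos h1, if_pos h1]
        simp only [pvGoB, pvGoA]
        rw [pv_join_empty_cons, pv_join_empty_nil]
        simp
      · rw [if_neg h1, if_neg h1]
        by_cases h2 : (PySem.Str.isIn "#lang" (String.ofList s) ||
            (PySem.Str.strip (String.ofList s) == "")) = true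
        · have h2f := pv_bool_or_not_and _ _ h2
          rw [if_pos h2, if_neg h2f]
          simp [pvGoA, pvGoB, pv_join_empty_nil]
        · have h2t := pv_bool_not_or_and _ _ h2
          rw [if_neg h2, if_pos h2t, pv_join_empty_nil]
          simp

-- ===== VERDICT (by name: the statement is the Claim_ definition above) =====
theorem get_racket_docstring_spec : Claim_equal_get_racket_docstring := by
  intro code _
  unfold Spec_get_racket_docstring get_racket_docstring get_racket_docstring_alt
  have h : "\n".toList = ['\n'] := by decide
  rw [h, pv_main code.toList.length code.toList (Nat.le_refl _) ""]
  simp
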